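-- pv_equiv track=rewrite | github.com/Skynse/instant_math | mathwizard_server/app/latex_normalizer.py | _expand_abs
-- ===== SOURCE A (Python) =====
-- def _expand_abs(s: str) -> str:
--     """Replace |expr| with Abs(expr) for simple (non-nested) cases."""
--     result = []
--     i = 0
--     while i < len(s):
--         if s[i] == "|":
--             # Find matching closing bar at same depth
--             close = s.find("|", i + 1)
--             if close != -1:
--                 inner = s[i + 1 : close]
--                 result.append(f"Abs({inner})")
--                 i = close + 1
--             else:
--                 result.append(s[i])
--                 i += 1
--         else:
--             result.append(s[i])
--             i += 1
--     return "".join(result)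
-- ===== SOURCE B (Python) =====
-- def _expand_abs(s: str) -> str:
--     """Replace |expr| with Abs(expr) for simple (non-nested) cases."""
--     out = []
--     buf = None  # None = outside bars; else chars collected since an opening bar
--     for ch in s:
--         if ch == "|":
--             if buf is None:
--                 buf = []
--             else:
--                 out.append(f"Abs({''.join(buf)})")
--                 buf = None
--         elif buf is None:
--             out.append(ch)
--         else:
--             buf.append(ch)
--     if buf is not None:
--         out.append("|" + "".join(buf))
--     return "".join(out)
-- ===== Notes on version B (the rewrite author's own statement) =====
-- stated objective: alternative
-- what changed: Replaced the index-based scan that calls str.find to locate each closing bar with a single-pass character state machine that buffers the text inside an open bar and emits Abs(...) when the closing bar arrives.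
import Mathlib
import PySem

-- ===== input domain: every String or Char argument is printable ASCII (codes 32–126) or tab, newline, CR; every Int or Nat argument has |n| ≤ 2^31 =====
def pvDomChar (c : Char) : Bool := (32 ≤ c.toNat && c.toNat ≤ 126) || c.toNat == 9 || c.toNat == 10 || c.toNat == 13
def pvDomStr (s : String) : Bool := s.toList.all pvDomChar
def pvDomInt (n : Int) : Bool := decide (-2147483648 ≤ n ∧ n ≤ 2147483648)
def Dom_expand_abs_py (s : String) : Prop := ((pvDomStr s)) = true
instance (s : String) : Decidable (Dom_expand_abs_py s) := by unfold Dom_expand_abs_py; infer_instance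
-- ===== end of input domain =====

-- B replaces A's index-and-find scan by a single-pass state machine over the characters
-- (objective: alternative single-pass decomposition; same asymptotic cost).

-- ===== PORT A =====
-- A's while-loop over index i becomes the standard recursion over the suffix s[i:];
-- s.find("|", i + 1) becomes PySem.Chars.find on the suffix after the bar (same occurrence,
-- index relative to that suffix), so s[i+1:close] is rest.take close.toNat and the next
-- suffix s[close+1:] is rest.drop (close.toNat + 1).
def aLoop : List Char → List Char
  | [] => []
  | c :: rest =>
    if c = '|' then
      let close := PySem.Chars.find rest ['|']
      if close ≠ -1 then
        ("Abs(".toList ++ rest.take close.toNat ++ ")".toList) ++ aLoop (rest.drop (close.toNat + 1))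
      else
        c :: aLoop rest
    else
      c :: aLoop rest
termination_by cs => cs.length
decreasing_by
  all_goals simp only [List.length_drop, List.length_cons]; omega

def expand_abs_py (s : String) : String := String.mk (aLoop s.toList)

-- ===== PORT B =====
-- B's for-loop with accumulator `out` and state `buf` (None = outside bars, Some b = inner
-- chars collected since an opening bar); the joined output is accumulated as a char list.
def bLoop : List Char → List Char → Option (List Char) → List Char
  | [], out, none => out
  | [], out, some b => out ++ '|' :: b
  | c :: rest, out, none =>
      if c = '|' then bLoop rest out (some [])
      else bLoop rest (out ++ [c]) none
  | c :: rest, out, some b =>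
      if c = '|' then bLoop rest (out ++ ("Abs(".toList ++ b ++ ")".toList)) none
      else bLoop rest out (some (b ++ [c]))

def expand_abs_py_alt (s : String) : String := String.mk (bLoop s.toList [] none)

-- ===== PRECONDITION & SPEC =====
def Spec_expand_abs_py (s : String) (out : String) : Prop := out = expand_abs_py_alt s
instance (s : String) (out : String) : Decidable (Spec_expand_abs_py s out) := by unfold Spec_expand_abs_py; infer_instance

-- ===== CLAIM (what is proved, stated in full; the proofs are below) =====
def Claim_equal_expand_abs_py : Prop := ∀ (s : String), Dom_expand_abs_py s → Spec_expand_abs_py s (expand_abs_py s)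

-- ===== LEMMAS AND PROOFS =====

theorem aLoop_nil : aLoop [] = [] := by rw [aLoop]

theorem aLoop_cons_bar (rest : List Char) :
    aLoop ('|' :: rest) =
      if PySem.Chars.find rest ['|'] ≠ -1 then
        ("Abs(".toList ++ rest.take (PySem.Chars.find rest ['|']).toNat ++ ")".toList)
          ++ aLoop (rest.drop ((PySem.Chars.find rest ['|']).toNat + 1))
      else '|' :: aLoop rest := by
  rw [aLoop]
  simp

theorem aLoop_cons_ne {c : Char} (rest : List Char) (hc : c ≠ '|') :
    aLoop (c :: rest) = c :: aLoop rest := by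
  rw [aLoop]
  simp [hc]

theorem bLoop_cons_bar_none (rest out : List Char) :
    bLoop ('|' :: rest) out none = bLoop rest out (some []) := by simp [bLoop]

theorem bLoop_cons_bar_some (rest out b : List Char) :
    bLoop ('|' :: rest) out (some b)
      = bLoop rest (out ++ ("Abs(".toList ++ b ++ ")".toList)) none := by simp [bLoop]

theorem bLoop_cons_ne_none {c : Char} (rest out : List Char) (hc : c ≠ '|') :
    bLoop (c :: rest) out none = bLoop rest (out ++ [c]) none := by simp [bLoop, hc]

theorem bLoop_cons_ne_some {c : Char} (rest out b : List Char) (hc : c ≠ '|') :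
    bLoop (c :: rest) out (some b) = bLoop rest out (some (b ++ [c])) := by simp [bLoop, hc]

theorem bar_split {cs : List Char} (h : '|' ∈ cs) :
    ∃ mid post, cs = mid ++ '|' :: post ∧ '|' ∉ mid := by
  induction cs with
  | nil => cases h
  | cons c rest ih =>
    by_cases hc : c = '|'
    · exact ⟨[], rest, by simp [hc], by simp⟩
    · have : '|' ∈ rest := by
        cases List.mem_cons.mp h with
        | inl h' => exact absurd (Eq.symm h') hc
        | inr h' => exact h'
      obtain ⟨mid, post, heq, hm⟩ := ih this
      refine ⟨c :: mid, post, by simp [heq], ?_⟩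
      intro hmem
      rcases List.mem_cons.mp hmem with h' | h'
      · exact hc (Eq.symm h')
      · exact hm h'

theorem find_no_bar {cs : List Char} (h : '|' ∉ cs) : PySem.Chars.find cs ['|'] = -1 := by
  rw [PySem.Chars.find_eq_neg_one_iff]
  intro hinf
  exact h (hinf.mem (by simp))

theorem find_bar {mid post : List Char} (h : '|' ∉ mid) :
    PySem.Chars.find (mid ++ '|' :: post) ['|'] = (mid.length : Int) := by
  have hinf : ['|'] <:+: mid ++ '|' :: post := ⟨mid, post, by simp⟩
  have h0 : 0 ≤ PySem.Chars.find (mid ++ '|' :: post) ['|'] :=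
    (PySem.Chars.find_nonneg_iff _ _).mpr hinf
  obtain ⟨hpre, hmin⟩ := PySem.Chars.find_spec (s := mid ++ '|' :: post) (sub := ['|']) h0
  have hdropmid : (mid ++ '|' :: post).drop mid.length = '|' :: post := by
    simp
  have hk_le : (PySem.Chars.find (mid ++ '|' :: post) ['|']).toNat ≤ mid.length := by
    by_contra hgt
    exact hmin mid.length (by omega) (by rw [hdropmid]; exact ⟨post, rfl⟩)
  have hk_ge : ¬ (PySem.Chars.find (mid ++ '|' :: post) ['|']).toNat < mid.length := by
    intro hlt
    obtain ⟨t, ht⟩ := hpre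
    have hklen : (PySem.Chars.find (mid ++ '|' :: post) ['|']).toNat
        < (mid ++ '|' :: post).length := by
      simp; omega
    have hdrop := List.drop_eq_getElem_cons hklen
    rw [hdrop] at ht
    have hbar : (mid ++ '|' :: post)[(PySem.Chars.find (mid ++ '|' :: post) ['|']).toNat]'hklen
        = '|' := Eq.symm (List.cons.inj ht).1
    have hmid : (mid ++ '|' :: post)[(PySem.Chars.find (mid ++ '|' :: post) ['|']).toNat]'hklen
        = mid[(PySem.Chars.find (mid ++ '|' :: post) ['|']).toNat]'hlt :=
      List.getElem_append_left hlt
    rw [hmid] at hbar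
    exact h (hbar ▸ List.getElem_mem hlt)
  omega

theorem aLoop_no_bar {cs : List Char} (h : '|' ∉ cs) : aLoop cs = cs := by
  induction cs with
  | nil => exact aLoop_nil
  | cons c rest ih =>
    have hc : c ≠ '|' := fun hh => h (by simp [hh])
    rw [aLoop_cons_ne rest hc, ih (fun hm => h (by simp [hm]))]

theorem bLoop_out (cs : List Char) (out : List Char) (b : Option (List Char)) :
    bLoop cs out b = out ++ bLoop cs [] b := by
  induction cs generalizing out b with
  | nil => cases b <;> simp [bLoop]
  | cons c rest ih =>
    cases b with
    | none =>
      by_cases hc : c = '|'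
      · subst hc
        rw [bLoop_cons_bar_none, bLoop_cons_bar_none]
        exact ih out (some [])
      · rw [bLoop_cons_ne_none rest out hc, bLoop_cons_ne_none rest [] hc,
            ih (out ++ [c]) none, ih ([] ++ [c]) none]
        simp
    | some bb =>
      by_cases hc : c = '|'
      · subst hc
        rw [bLoop_cons_bar_some, bLoop_cons_bar_some,
            ih (out ++ ("Abs(".toList ++ bb ++ ")".toList)) none,
            ih ([] ++ ("Abs(".toList ++ bb ++ ")".toList)) none]
        simp
      · rw [bLoop_cons_ne_some rest out bb hc, bLoop_cons_ne_some rest [] bb hc]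
        exact ih out (some (bb ++ [c]))

theorem bLoop_no_bar_some {cs : List Char} (b : List Char) (h : '|' ∉ cs) :
    bLoop cs [] (some b) = '|' :: (b ++ cs) := by
  induction cs generalizing b with
  | nil => simp [bLoop]
  | cons c rest ih =>
    have hc : c ≠ '|' := fun hh => h (by simp [hh])
    rw [bLoop_cons_ne_some rest [] b hc, ih (b ++ [c]) (fun hm => h (by simp [hm]))]
    simp

theorem bLoop_some_bar {mid : List Char} (post b : List Char) (h : '|' ∉ mid) :
    bLoop (mid ++ '|' :: post) [] (some b)
      = ("Abs(".toList ++ (b ++ mid) ++ ")".toList) ++ bLoop post [] none := by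
  induction mid generalizing b with
  | nil =>
    rw [List.nil_append, bLoop_cons_bar_some, bLoop_out]
    simp
  | cons c rest ih =>
    have hc : c ≠ '|' := fun hh => h (by simp [hh])
    rw [List.cons_append, bLoop_cons_ne_some _ [] b hc,
        ih (b ++ [c]) (fun hm => h (by simp [hm]))]
    simp

theorem main_eq : ∀ (n : Nat) (cs : List Char), cs.length ≤ n → aLoop cs = bLoop cs [] none := by
  intro n
  induction n with
  | zero =>
    intro cs hlen
    have : cs = [] := List.eq_nil_of_length_eq_zero (by omega)
    subst this
    rw [aLoop_nil]; rfl
  | succ n ih =>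
    intro cs hlen
    cases cs with
    | nil => rw [aLoop_nil]; rfl
    | cons c rest =>
      by_cases hc : c = '|'
      · subst hc
        by_cases hb : '|' ∈ rest
        · obtain ⟨mid, post, heq, hm⟩ := bar_split hb
          subst heq
          have hfind : PySem.Chars.find (mid ++ '|' :: post) ['|'] = (mid.length : Int) :=
            find_bar hm
          have hne : (mid.length : Int) ≠ -1 := by omega
          have htake : (mid ++ '|' :: post).take mid.length = mid := List.take_left
          have hdrop : (mid ++ '|' :: post).drop (mid.length + 1) = post := by
            have h1 : mid ++ '|' :: post = (mid ++ ['|']) ++ post := by simp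
            rw [h1, show mid.length + 1 = (mid ++ ['|']).length by simp]
            exact List.drop_left
          rw [aLoop_cons_bar, hfind, if_pos hne, Int.toNat_natCast, htake, hdrop,
              bLoop_cons_bar_none, bLoop_some_bar post [] hm,
              ih post (by simp at hlen; omega)]
          simp
        · have hfind := find_no_bar hb
          rw [aLoop_cons_bar, hfind, if_neg (by simp), aLoop_no_bar hb,
              bLoop_cons_bar_none, bLoop_no_bar_some [] hb]
          simp
      · rw [aLoop_cons_ne rest hc, bLoop_cons_ne_none rest [] hc,
            bLoop_out rest ([] ++ [c]) none, ih rest (by simp at hlen; omega)]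
        simp

-- ===== VERDICT (by name: the statement is the Claim_ definition above) =====
theorem expand_abs_py_spec : Claim_equal_expand_abs_py := by
  intro s _
  unfold Spec_expand_abs_py expand_abs_py expand_abs_py_alt
  rw [main_eq s.toList.length s.toList le_rfl]
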